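-- pv_equiv track=rewrite | github.com/TaeHyoungKwon/Codewars | c_2021/algorithm_practice/brute_force/brute_force.py | solution
-- ===== SOURCE A (Python) =====
-- MAX_MINUTES = 60
--
-- MAX_SECONDS = 60
--
-- def solution(hour):
--     return sum(
--         True
--         for h in range(hour + 1)
--         for m in range(MAX_MINUTES)
--         for s in range(MAX_SECONDS)
--         if "3" in "".join(map(str, [h, m, s]))
--     )
-- ===== SOURCE B (Python) =====
-- MAX_MINUTES = 60
--
-- MAX_SECONDS = 60
--
--
-- def solution(hour):
--     # Per hour h the 3600 (minute, second) pairs contribute 3600 if '3' occurs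
--     # in str(h) (every pair counts), else 1575 (the pairs where '3' occurs in
--     # the minute or second; 45 of 60 minute values and 45 of 60 second values
--     # avoid '3', leaving 3600 - 45*45 = 1575 that contain it).
--     total = 0
--     for h in range(hour + 1):
--         total += 3600 if "3" in str(h) else 1575
--     return total
-- ===== Notes on version B (the rewrite author's own statement) =====
-- stated objective: faster
-- what changed: Replaced the triple loop over (hour, minute, second) by a single loop over hours that adds a precomputed per-hour constant (3600 if the hour's digits contain '3', else 1575 = 3600 - 45*45).
import Mathlib
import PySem

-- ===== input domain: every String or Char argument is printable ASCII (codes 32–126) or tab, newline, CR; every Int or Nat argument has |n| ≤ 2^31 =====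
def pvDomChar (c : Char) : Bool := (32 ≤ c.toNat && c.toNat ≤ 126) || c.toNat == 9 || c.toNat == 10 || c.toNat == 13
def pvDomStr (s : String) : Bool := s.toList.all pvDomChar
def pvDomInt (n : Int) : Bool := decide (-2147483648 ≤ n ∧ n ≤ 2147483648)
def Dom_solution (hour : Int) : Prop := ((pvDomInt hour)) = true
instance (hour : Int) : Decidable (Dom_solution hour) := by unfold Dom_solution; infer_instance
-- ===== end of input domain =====

-- B replaces A's triple loop by one loop over hours adding a per-hour constant (3600 / 1575); objective: faster.

-- ===== PORT A =====
def MAX_MINUTES : Int := 60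

def MAX_SECONDS : Int := 60

def solution (hour : Int) : Int :=
  (PySem.List.pyRange 0 (hour + 1) 1).foldl (fun acc h =>
    (PySem.List.pyRange 0 MAX_MINUTES 1).foldl (fun acc m =>
      (PySem.List.pyRange 0 MAX_SECONDS 1).foldl (fun acc s =>
        if PySem.Str.isIn "3" (PySem.Str.join "" ([h, m, s].map PySem.Int.toStr)) then acc + 1
        else acc) acc) acc) 0

-- ===== PORT B =====
def solution_alt (hour : Int) : Int :=
  (PySem.List.pyRange 0 (hour + 1) 1).foldl
    (fun total h => total + (if PySem.Str.isIn "3" (PySem.Int.toStr h) then 3600 else 1575)) 0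

-- ===== PRECONDITION & SPEC =====
def Spec_solution (hour : Int) (out : Int) : Prop := out = solution_alt hour
instance (hour : Int) (out : Int) : Decidable (Spec_solution hour out) := by unfold Spec_solution; infer_instance

-- ===== CLAIM (what is proved, stated in full; the proofs are below) =====
def Claim_equal_solution : Prop := ∀ (hour : Int), Dom_solution hour → Spec_solution hour (solution hour)

-- ===== LEMMAS AND PROOFS =====

-- the single-character test on the joined string splits over the three parts
lemma cond_split (h m s : Int) :
    PySem.Str.isIn "3" (PySem.Str.join "" ([h, m, s].map PySem.Int.toStr))
      = (PySem.Chars.isIn ['3'] (PySem.Int.toChars h)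
          || PySem.Chars.isIn ['3'] (PySem.Int.toChars m)
          || PySem.Chars.isIn ['3'] (PySem.Int.toChars s)) := by
  have hj : (PySem.Str.join "" ([h, m, s].map PySem.Int.toStr)).toList
      = PySem.Int.toChars h ++ PySem.Int.toChars m ++ PySem.Int.toChars s := by
    simp [PySem.Str.toList_join, PySem.Chars.join_cons_cons, PySem.Int.toList_toStr]
  rw [Bool.eq_iff_iff]
  simp only [PySem.Str.isIn_eq, hj, Bool.or_eq_true, PySem.Chars.isIn_iff_infix]
  rw [show "3".toList = ['3'] from rfl]
  simp only [List.singleton_infix_iff, List.mem_append]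

-- per hour h, the minute/second double loop adds exactly 3600 or 1575
set_option maxHeartbeats 2000000 in
lemma inner_eq (h acc : Int) :
    (PySem.List.pyRange 0 MAX_MINUTES 1).foldl (fun acc m =>
      (PySem.List.pyRange 0 MAX_SECONDS 1).foldl (fun acc s =>
        if PySem.Str.isIn "3" (PySem.Str.join "" ([h, m, s].map PySem.Int.toStr)) then acc + 1
        else acc) acc) acc
      = acc + (if PySem.Str.isIn "3" (PySem.Int.toStr h) then 3600 else 1575) := by
  have hb : PySem.Str.isIn "3" (PySem.Int.toStr h)
      = PySem.Chars.isIn ['3'] (PySem.Int.toChars h) := by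
    simp [PySem.Str.isIn_eq, PySem.Int.toList_toStr]
  simp only [cond_split, hb]
  cases hc : PySem.Chars.isIn ['3'] (PySem.Int.toChars h) with
  | true =>
    simp only [Bool.true_or, if_true]
    have h1 : ∀ a : Int, (PySem.List.pyRange 0 MAX_SECONDS 1).foldl
        (fun (acc : Int) (_ : Int) => acc + 1) a = a + 60 := by
      intro a
      rw [PySem.List.foldl_add (PySem.List.pyRange 0 MAX_SECONDS 1) (fun _ => (1 : Int)) a,
        PySem.List.sum_map_const_int]
      simp [MAX_SECONDS, PySem.List.length_pyRange_one]
    simp only [h1]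
    rw [PySem.List.foldl_add (PySem.List.pyRange 0 MAX_MINUTES 1) (fun _ => (60 : Int)) acc,
      PySem.List.sum_map_const_int]
    simp [MAX_MINUTES, PySem.List.length_pyRange_one]
  | false =>
    simp only [Bool.false_or]
    have h1 : ∀ a m : Int, (PySem.List.pyRange 0 MAX_SECONDS 1).foldl
        (fun (acc s : Int) => if PySem.Chars.isIn ['3'] (PySem.Int.toChars m)
            || PySem.Chars.isIn ['3'] (PySem.Int.toChars s) then acc + 1 else acc) a
        = a + (((PySem.List.pyRange 0 MAX_SECONDS 1).countP
            (fun s => PySem.Chars.isIn ['3'] (PySem.Int.toChars m)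
              || PySem.Chars.isIn ['3'] (PySem.Int.toChars s)) : Nat) : Int) := by
      intro a m
      exact PySem.List.foldl_count_if _ _ a
    simp only [h1]
    rw [PySem.List.foldl_add (PySem.List.pyRange 0 MAX_MINUTES 1) _ acc]
    have : ((PySem.List.pyRange 0 MAX_MINUTES 1).map (fun m =>
        (((PySem.List.pyRange 0 MAX_SECONDS 1).countP
          (fun s => PySem.Chars.isIn ['3'] (PySem.Int.toChars m)
            || PySem.Chars.isIn ['3'] (PySem.Int.toChars s)) : Nat) : Int))).sum = 1575 := by
      decide
    rw [this]
    simp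

-- ===== VERDICT (by name: the statement is the Claim_ definition above) =====
theorem solution_spec : Claim_equal_solution := by
  intro hour _
  unfold Spec_solution solution solution_alt
  have hfun : (fun (acc h : Int) =>
      (PySem.List.pyRange 0 MAX_MINUTES 1).foldl (fun acc m =>
        (PySem.List.pyRange 0 MAX_SECONDS 1).foldl (fun acc s =>
          if PySem.Str.isIn "3" (PySem.Str.join "" ([h, m, s].map PySem.Int.toStr)) then acc + 1
          else acc) acc) acc)
      = fun (total h : Int) =>
        total + (if PySem.Str.isIn "3" (PySem.Int.toStr h) then 3600 else 1575) := by
    funext acc h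
    exact inner_eq h acc
  rw [hfun]
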